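-- pv_equiv track=rewrite | github.com/nprasann/rag-starter-template | main.py | limit_chunks_per_source
-- ===== SOURCE A (Python) =====
-- def limit_chunks_per_source(retrieved_chunks, retrieved_metadatas, max_per_source=1):
--     """
--     Limit how many retrieved chunks can come from the same source file.
--
--     Args:
--         retrieved_chunks: list of retrieved text chunks
--         retrieved_metadatas: list of metadata dicts for the chunks
--         max_per_source: maximum number of chunks allowed per source file
--
--     Returns:
--         filtered_chunks, filtered_metadatas
--     """
--     source_counts = {}
--     filtered_chunks = []
--     filtered_metadatas = []
--
--     for chunk, metadata in zip(retrieved_chunks, retrieved_metadatas):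
--         source = metadata["source"]
--         current_count = source_counts.get(source, 0)
--
--         if current_count < max_per_source:
--             filtered_chunks.append(chunk)
--             filtered_metadatas.append(metadata)
--             source_counts[source] = current_count + 1
--
--     return filtered_chunks, filtered_metadatas
-- ===== SOURCE B (Python) =====
-- def limit_chunks_per_source(retrieved_chunks, retrieved_metadatas, max_per_source=1):
--     """Group-free brute-force reformulation: an item is kept iff the number of
--     earlier zipped items with the same source is below max_per_source."""
--     pairs = list(zip(retrieved_chunks, retrieved_metadatas))
--     sources = [m["source"] for _, m in pairs]
--     keep = [i for i in range(len(pairs))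
--             if sum(1 for j in range(i) if sources[j] == sources[i]) < max_per_source]
--     return [pairs[i][0] for i in keep], [pairs[i][1] for i in keep]
-- ===== Notes on version B (the rewrite author's own statement) =====
-- stated objective: alternative
-- what changed: Replaces A's single pass with a running per-source counter dict by a dict-free two-phase formulation: extract the source list once, then select index i iff the count of earlier indices with the same source is below max_per_source, and finally emit the selected rows; a quadratic earlier-duplicate scan replaces the mutable counter.
import Mathlib
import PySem

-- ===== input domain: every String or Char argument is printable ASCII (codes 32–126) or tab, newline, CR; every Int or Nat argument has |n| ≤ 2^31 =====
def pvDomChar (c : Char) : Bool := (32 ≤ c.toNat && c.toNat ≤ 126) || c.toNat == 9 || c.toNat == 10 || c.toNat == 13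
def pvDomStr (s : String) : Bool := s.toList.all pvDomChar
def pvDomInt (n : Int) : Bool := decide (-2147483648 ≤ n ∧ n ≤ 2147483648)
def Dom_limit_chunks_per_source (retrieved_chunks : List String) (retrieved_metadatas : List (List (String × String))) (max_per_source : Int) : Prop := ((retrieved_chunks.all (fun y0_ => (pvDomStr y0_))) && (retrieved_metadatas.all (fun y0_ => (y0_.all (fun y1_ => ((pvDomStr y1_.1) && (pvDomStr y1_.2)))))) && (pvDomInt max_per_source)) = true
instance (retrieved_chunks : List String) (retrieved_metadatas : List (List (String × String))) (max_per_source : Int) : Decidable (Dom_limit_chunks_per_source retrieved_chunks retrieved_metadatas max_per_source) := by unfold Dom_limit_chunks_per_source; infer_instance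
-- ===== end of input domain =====

-- B replaces A's single pass with a mutable per-source counter dict by a dict-free two-phase
-- formulation (keep index i iff the number of earlier same-source indices is < max_per_source);
-- objective: alternative algorithm (not faster).

-- ===== PORT A =====
-- metadata["source"]: the KeyError case (missing key) is excluded by Pre_, so the port reads with a default
def msrc (m : List (String × String)) : String :=
  ((PySem.Dict.mk m).get? "source").getD ""

-- the loop body of A, as a named helper
def stepA (max_per_source : Int)
    (st : PySem.Dict String Int × List String × List (List (String × String)))
    (cm : String × List (String × String)) :
    PySem.Dict String Int × List String × List (List (String × String)) :=
  let source := msrc cm.2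
  let current := PySem.Dict.getD st.1 source 0
  if current < max_per_source then
    (PySem.Dict.insert st.1 source (current + 1), st.2.1 ++ [cm.1], st.2.2 ++ [cm.2])
  else st

def limit_chunks_per_source (retrieved_chunks : List String) (retrieved_metadatas : List (List (String × String))) (max_per_source : Int) : List String × (List (List (String × String))) :=
  let r := (List.zip retrieved_chunks retrieved_metadatas).foldl (stepA max_per_source)
    ((PySem.Dict.empty : PySem.Dict String Int), ([] : List String), ([] : List (List (String × String))))
  (r.2.1, r.2.2)

-- ===== PORT B =====
def limit_chunks_per_source_alt (retrieved_chunks : List String) (retrieved_metadatas : List (List (String × String))) (max_per_source : Int) : List String × (List (List (String × String))) :=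
  let pairs := List.zip retrieved_chunks retrieved_metadatas
  let sources := pairs.map (fun p => msrc p.2)
  let keep := (List.range pairs.length).filter
      (fun i => (((List.range i).filter
          (fun j => sources.getD j "" == sources.getD i "")).length : Int) < max_per_source)
  (keep.map (fun i => (pairs.getD i ("", [])).1),
   keep.map (fun i => (pairs.getD i ("", [])).2))

-- ===== PRECONDITION & SPEC =====
-- Pre_ excludes exactly the inputs on which the Python A raises KeyError: some zipped metadata
-- dict lacking the key "source".
def Pre_limit_chunks_per_source (retrieved_chunks : List String) (retrieved_metadatas : List (List (String × String))) (max_per_source : Int) : Prop :=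
  ∀ p ∈ List.zip retrieved_chunks retrieved_metadatas, ((PySem.Dict.mk p.2).get? "source").isSome = true
instance (retrieved_chunks : List String) (retrieved_metadatas : List (List (String × String))) (max_per_source : Int) : Decidable (Pre_limit_chunks_per_source retrieved_chunks retrieved_metadatas max_per_source) := by unfold Pre_limit_chunks_per_source; infer_instance

def pvWitness_limit_chunks_per_source : List String × (List (List (String × String))) × Int :=
  (["a", "b", "c"], [[("source", "x")], [("source", "x")], [("source", "y")]], 1)

def Spec_limit_chunks_per_source (retrieved_chunks : List String) (retrieved_metadatas : List (List (String × String))) (max_per_source : Int) (out : List String × (List (List (String × String)))) : Prop := out = limit_chunks_per_source_alt retrieved_chunks retrieved_metadatas max_per_source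
instance (retrieved_chunks : List String) (retrieved_metadatas : List (List (String × String))) (max_per_source : Int) (out : List String × (List (List (String × String)))) : Decidable (Spec_limit_chunks_per_source retrieved_chunks retrieved_metadatas max_per_source out) := by unfold Spec_limit_chunks_per_source; infer_instance

-- ===== CLAIM (what is proved, stated in full; the proofs are below) =====
def Claim_equal_limit_chunks_per_source : Prop := ∀ (retrieved_chunks : List String) (retrieved_metadatas : List (List (String × String))) (max_per_source : Int), Dom_limit_chunks_per_source retrieved_chunks retrieved_metadatas max_per_source → Pre_limit_chunks_per_source retrieved_chunks retrieved_metadatas max_per_source → Spec_limit_chunks_per_source retrieved_chunks retrieved_metadatas max_per_source (limit_chunks_per_source retrieved_chunks retrieved_metadatas max_per_source)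

-- ===== LEMMAS AND PROOFS =====

-- reference selection: keep an item iff its source occurred < max times among the earlier sources
def selRec (max_per_source : Int) (pre : List String) :
    List (String × List (String × String)) → List (String × List (String × String))
  | [] => []
  | cm :: t =>
    if ((pre.count (msrc cm.2) : Int) < max_per_source)
    then cm :: selRec max_per_source (pre ++ [msrc cm.2]) t
    else selRec max_per_source (pre ++ [msrc cm.2]) t

lemma count_append_singleton (pre : List String) (x s : String) :
    ((pre ++ [x]).count s : Int) = (pre.count s : Int) + (if s = x then 1 else 0) := by
  by_cases h : s = x
  · subst h; simp [List.count_append, List.count_singleton]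
  · have hx : (x == s) = false := beq_eq_false_iff_ne.mpr (Ne.symm h)
    simp [List.count_append, List.count_singleton, hx, h]

lemma A_fold (m : Int) (l : List (String × List (String × String)))
    (c : PySem.Dict String Int) (fc : List String) (fm : List (List (String × String)))
    (pre : List String)
    (hc : ∀ s, c.getD s 0 = max 0 (min m (pre.count s : Int))) :
    (l.foldl (stepA m) (c, fc, fm)).2 =
      (fc ++ (selRec m pre l).map (·.1), fm ++ (selRec m pre l).map (·.2)) := by
  induction l generalizing c fc fm pre with
  | nil => simp [selRec]
  | cons cm t ih =>
    have hpos : (0 : Int) ≤ (pre.count (msrc cm.2) : Int) := Int.natCast_nonneg _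
    have hcm := hc (msrc cm.2)
    have hcur : c.getD (msrc cm.2) 0 < m ↔ ((pre.count (msrc cm.2) : Int) < m) := by
      rw [hcm]; omega
    rw [List.foldl_cons]
    by_cases hk : ((pre.count (msrc cm.2) : Int) < m)
    · have hklt : c.getD (msrc cm.2) 0 < m := hcur.mpr hk
      have hstep : stepA m (c, fc, fm) cm =
          (PySem.Dict.insert c (msrc cm.2) (c.getD (msrc cm.2) 0 + 1),
           fc ++ [cm.1], fm ++ [cm.2]) := by
        simp only [stepA, if_pos hklt]
      rw [hstep, ih _ _ _ (pre ++ [msrc cm.2]) ?_, selRec, if_pos hk]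
      · simp
      · intro s
        have hcnt := count_append_singleton pre (msrc cm.2) s
        have hcs := hc s
        rw [PySem.Dict.getD_insert]
        by_cases hs : s = msrc cm.2
        · rw [if_pos hs] at hcnt ⊢
          subst hs
          omega
        · rw [if_neg hs] at hcnt ⊢
          omega
    · have hknlt : ¬ c.getD (msrc cm.2) 0 < m := fun h => hk (hcur.mp h)
      have hstep : stepA m (c, fc, fm) cm = (c, fc, fm) := by
        simp only [stepA, if_neg hknlt]
      rw [hstep, ih _ _ _ (pre ++ [msrc cm.2]) ?_, selRec, if_neg hk]
      intro s
      have hcnt := count_append_singleton pre (msrc cm.2) s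
      have hcs := hc s
      rw [hcs]
      by_cases hs : s = msrc cm.2
      · rw [if_pos hs] at hcnt
        subst hs
        omega
      · rw [if_neg hs] at hcnt
        omega

lemma A_eq_sel (cs : List String) (ms : List (List (String × String))) (m : Int) :
    limit_chunks_per_source cs ms m =
      ((selRec m [] (List.zip cs ms)).map (·.1), (selRec m [] (List.zip cs ms)).map (·.2)) := by
  unfold limit_chunks_per_source
  have h := A_fold m (List.zip cs ms) PySem.Dict.empty [] [] []
    (by intro s; rw [PySem.Dict.getD_empty]; simp only [List.count_nil, Nat.cast_zero]; omega)
  simp only [List.nil_append] at h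
  exact congrArg (fun p => (p.1, p.2)) h

-- the inner range-scan of B counts earlier occurrences of the i-th source
lemma cnt_range (xs : List String) (x : String) (i : Nat) (hi : i ≤ xs.length) :
    ((List.range i).filter (fun j => xs.getD j "" == x)).length = (xs.take i).count x := by
  induction i with
  | zero => simp
  | succ n ihn =>
    have hn : n < xs.length := Nat.lt_of_lt_of_le (Nat.lt_succ_self n) hi
    have hget : xs.getD n "" = xs[n] := List.getD_eq_getElem xs "" hn
    rw [List.range_succ, List.filter_append, List.length_append, ihn (Nat.le_of_lt hn),
        List.take_add_one, List.getElem?_eq_getElem hn]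
    simp only [Option.toList, List.count_append, List.filter, hget]
    by_cases h : (xs[n] == x)
    · simp [h, List.count_singleton]
    · simp [h, List.count_singleton]

lemma B_sel (m : Int) (l pre : List (String × List (String × String))) :
    ((List.range' pre.length l.length).filter
       (fun i => decide (((((pre ++ l).map (fun p => msrc p.2)).take i).count
            (((pre ++ l).map (fun p => msrc p.2)).getD i "") : Int) < m))).map
       (fun i => (pre ++ l).getD i ("", []))
    = selRec m (pre.map (fun p => msrc p.2)) l := by
  induction l generalizing pre with
  | nil => simp [selRec]
  | cons cm t ih =>
    have hlen : (List.map (fun p => msrc p.2) pre).length = pre.length := List.length_map ..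
    have hsrc : ((pre ++ cm :: t).map (fun p => msrc p.2)).getD pre.length "" = msrc cm.2 := by
      rw [List.map_append, ← hlen, List.getD_append_right _ _ _ _ (Nat.le_refl _), Nat.sub_self]
      rfl
    have htake : ((pre ++ cm :: t).map (fun p => msrc p.2)).take pre.length
        = pre.map (fun p => msrc p.2) := by
      rw [List.map_append, ← hlen, List.take_left]
    have hget : (pre ++ cm :: t).getD pre.length ("", []) = cm := by
      rw [List.getD_append_right _ _ _ _ (Nat.le_refl _), Nat.sub_self]
      rfl
    have hih := ih (pre ++ [cm])
    have e1 : (pre ++ [cm]) ++ t = pre ++ cm :: t := by simp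
    have e2 : (pre ++ [cm]).map (fun p => msrc p.2)
        = pre.map (fun p => msrc p.2) ++ [msrc cm.2] := by simp
    have e3 : (pre ++ [cm]).length = pre.length + 1 := by simp
    simp only [e1, e2, e3] at hih
    simp only [List.length_cons, List.range'_succ, List.filter_cons, hsrc, htake]
    rw [selRec]
    by_cases hk : (((pre.map (fun p => msrc p.2)).count (msrc cm.2) : Int) < m)
    · rw [if_pos (decide_eq_true hk), if_pos hk, List.map_cons, hget]
      exact congrArg (cm :: ·) hih
    · rw [if_neg (by simp [hk]), if_neg hk]
      exact hih

lemma B_core (m : Int) (P : List (String × List (String × String))) :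
    ((List.range P.length).filter
       (fun i => decide ((((List.range i).filter
          (fun j => (P.map (fun p => msrc p.2)).getD j "" ==
                    (P.map (fun p => msrc p.2)).getD i "")).length : Int) < m))).map
       (fun i => P.getD i ("", []))
    = selRec m [] P := by
  have hfc : (List.range P.length).filter
       (fun i => decide ((((List.range i).filter
          (fun j => (P.map (fun p => msrc p.2)).getD j "" ==
                    (P.map (fun p => msrc p.2)).getD i "")).length : Int) < m))
      = (List.range P.length).filter
          (fun i => decide ((((P.map (fun p => msrc p.2)).take i).count
              ((P.map (fun p => msrc p.2)).getD i "") : Int) < m)) := by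
    apply List.filter_congr
    intro i hi
    have hi' : i < P.length := List.mem_range.mp hi
    rw [cnt_range (P.map (fun p => msrc p.2)) ((P.map (fun p => msrc p.2)).getD i "") i
      (by rw [List.length_map]; exact Nat.le_of_lt hi')]
  rw [hfc, List.range_eq_range']
  have hB := B_sel m P []
  simp only [List.nil_append, List.length_nil, List.map_nil] at hB
  exact hB

lemma B_eq_sel (cs : List String) (ms : List (List (String × String))) (m : Int) :
    limit_chunks_per_source_alt cs ms m =
      ((selRec m [] (List.zip cs ms)).map (·.1), (selRec m [] (List.zip cs ms)).map (·.2)) := by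
  have h := B_core m (List.zip cs ms)
  simp only [limit_chunks_per_source_alt]
  rw [← h]
  simp [List.map_map, Function.comp]

-- ===== VERDICT (by name: the statement is the Claim_ definition above) =====
theorem limit_chunks_per_source_spec : Claim_equal_limit_chunks_per_source := by
  intro cs ms m _ _
  unfold Spec_limit_chunks_per_source
  rw [A_eq_sel, B_eq_sel]
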